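-- pv_equiv track=rewrite | github.com/jdelpino-dev/thinkpython | bibth3_strings.py | rot_decoder
-- ===== SOURCE A (Python) =====
-- def rot_decoder(string, rotation, chr_bloks):
--     decoded_string = ""
--     for character in string:
--         decoded_chr = character
--         for chr_blok in chr_bloks:
--             if character in chr_blok:
--                 # I use modular arithmetic to make the alphabetic rotation
--                 pos = chr_blok.index(character)
--                 mod_n = len(chr_blok)
--                 new_pos = (pos - rotation) % mod_n
--                 decoded_chr = chr_blok[new_pos]
--                 break
--         decoded_string += decoded_chr
--     return decoded_string
-- ===== SOURCE B (Python) =====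
-- def rot_decoder(string, rotation, chr_bloks):
--     # Build the decode table once: earlier blocks / earlier positions win,
--     # matching the original's break + .index semantics.
--     decode_map = {}
--     for chr_blok in chr_bloks:
--         n = len(chr_blok)
--         for pos, c in enumerate(chr_blok):
--             if c not in decode_map:
--                 decode_map[c] = chr_blok[(pos - rotation) % n]
--     return "".join(decode_map.get(c, c) for c in string)
-- ===== Notes on version B (the rewrite author's own statement) =====
-- stated objective: faster
-- what changed: B precomputes a decode table from the character blocks once (first-block/first-position wins) and then decodes the string in one pass with O(1) dict lookups, instead of rescanning every block (membership test + .index) for every character of the string.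
import Mathlib
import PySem

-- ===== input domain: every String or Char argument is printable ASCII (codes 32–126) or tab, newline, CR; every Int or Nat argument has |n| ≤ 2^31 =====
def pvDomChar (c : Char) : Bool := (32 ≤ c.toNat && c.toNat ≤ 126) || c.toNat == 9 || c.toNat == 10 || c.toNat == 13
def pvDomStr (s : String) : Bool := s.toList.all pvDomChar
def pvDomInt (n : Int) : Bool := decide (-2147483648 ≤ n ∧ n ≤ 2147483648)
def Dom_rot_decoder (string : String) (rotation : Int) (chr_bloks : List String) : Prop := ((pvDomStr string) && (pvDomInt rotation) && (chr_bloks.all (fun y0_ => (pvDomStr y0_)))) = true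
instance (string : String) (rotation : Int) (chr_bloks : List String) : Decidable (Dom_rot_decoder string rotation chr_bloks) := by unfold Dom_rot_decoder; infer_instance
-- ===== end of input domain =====

-- B builds the decode table once and decodes in a single pass (asymptotically faster than
-- A's per-character rescan of every block); return values proved equal on the whole domain.

-- ===== PORT A =====
-- inner loop 'for chr_blok in chr_bloks: … break' of A; 'character in chr_blok' on a
-- 1-char string is exactly char membership in the block's characters
def rot_decoder_inner (character : Char) (rotation : Int) : List String → Char
  | [] => character
  | chr_blok :: rest =>
    if character ∈ chr_blok.toList then
      -- pos = chr_blok.index(character): guarded by membership, so index? is some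
      let pos : Nat := (PySem.List.index? chr_blok.toList character).getD 0
      let mod_n : Int := PySem.List.len chr_blok.toList
      -- chr_blok[new_pos]: new_pos = (pos - rotation) % mod_n is always in range, default unused
      PySem.List.pyGetD chr_blok.toList (PySem.Int.mod ((pos : Int) - rotation) mod_n) character
    else rot_decoder_inner character rotation rest

def rot_decoder (string : String) (rotation : Int) (chr_bloks : List String) : String :=
  String.ofList
    (string.toList.foldl
      (fun decoded_string character =>
        decoded_string ++ [rot_decoder_inner character rotation chr_bloks]) [])

-- ===== PORT B =====
def rot_decoder_build (rotation : Int) (chr_bloks : List String) : PySem.Dict Char Char :=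
  chr_bloks.foldl
    (fun d chr_blok =>
      (PySem.List.enumerate chr_blok.toList 0).foldl
        (fun d pc =>
          if d.contains pc.2 then d
          else d.insert pc.2
            (PySem.List.pyGetD chr_blok.toList
              (PySem.Int.mod (pc.1 - rotation) (PySem.List.len chr_blok.toList)) pc.2))
        d)
    PySem.Dict.empty

def rot_decoder_alt (string : String) (rotation : Int) (chr_bloks : List String) : String :=
  let decode_map := rot_decoder_build rotation chr_bloks
  String.ofList (string.toList.map (fun c => decode_map.getD c c))

-- ===== PRECONDITION & SPEC =====
def Spec_rot_decoder (string : String) (rotation : Int) (chr_bloks : List String) (out : String) : Prop := out = rot_decoder_alt string rotation chr_bloks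
instance (string : String) (rotation : Int) (chr_bloks : List String) (out : String) : Decidable (Spec_rot_decoder string rotation chr_bloks out) := by unfold Spec_rot_decoder; infer_instance

-- ===== CLAIM (what is proved, stated in full; the proofs are below) =====
def Claim_equal_rot_decoder : Prop := ∀ (string : String) (rotation : Int) (chr_bloks : List String), Dom_rot_decoder string rotation chr_bloks → Spec_rot_decoder string rotation chr_bloks (rot_decoder string rotation chr_bloks)

-- ===== LEMMAS AND PROOFS =====

lemma pv_get?_none {d : PySem.Dict Char Char} {c : Char} (h : d.contains c = false) :
    d.get? c = none := by
  rw [PySem.Dict.contains_eq_isSome_get?] at h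
  exact Option.not_isSome_iff_eq_none.mp (by simp [h])

-- the decoded character for c, as an Option: first block containing c wins
def pvDecode? (c : Char) (rotation : Int) : List String → Option Char
  | [] => none
  | b :: rest =>
    match PySem.List.index? b.toList c with
    | some k =>
        some (PySem.List.pyGetD b.toList
          (PySem.Int.mod ((k : Int) - rotation) (PySem.List.len b.toList)) c)
    | none => pvDecode? c rotation rest

lemma pv_inner_fold_get? (f : Int × Char → Char) (c : Char) :
    ∀ (ps : List (Int × Char)) (d : PySem.Dict Char Char),
    (ps.foldl (fun d pc => if d.contains pc.2 then d else d.insert pc.2 (f pc)) d).get? c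
      = if d.contains c then d.get? c
        else (ps.find? (fun p => p.2 == c)).map f := by
  intro ps
  induction ps with
  | nil =>
    intro d
    simp only [List.foldl_nil, List.find?_nil, Option.map_none]
    by_cases h : d.contains c = true
    · simp [h]
    · simp [h, pv_get?_none (by simpa using h)]
  | cons p ps ih =>
    intro d
    simp only [List.foldl_cons, List.find?_cons]
    by_cases hpc : p.2 = c
    · subst hpc
      by_cases hd : d.contains p.2 = true
      · simp [hd, ih]
      · simp only [hd, ih, beq_self_eq_true]
        have hc : (d.insert p.2 (f p)).contains p.2 = true :=
          PySem.Dict.contains_insert_self _ _ _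
        simp [hc, PySem.Dict.get?_insert_self]
    · have hne : c ≠ p.2 := fun h => hpc h.symm
      have hbeq : (p.2 == c) = false := by simp [hpc]
      by_cases hd : d.contains p.2 = true
      · simp only [hd, if_true, ih, hbeq]
      · simp only [hd, if_false, ih, hbeq, Bool.false_eq_true]
        have hcont : (d.insert p.2 (f p)).contains c = d.contains c := by
          rw [PySem.Dict.contains_insert]
          simp [hne]
        rw [hcont, PySem.Dict.get?_insert_of_ne _ _ hne]

lemma pv_find?_enumerate (c : Char) :
    ∀ (xs : List Char) (s : Int),
    (PySem.List.enumerate xs s).find? (fun p => p.2 == c)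
      = (PySem.List.index? xs c).map (fun k => (s + (k : Int), c)) := by
  intro xs
  induction xs with
  | nil => intro s; simp [PySem.List.enumerate_nil]
  | cons x xs ih =>
    intro s
    rw [PySem.List.enumerate_cons]
    by_cases hx : x = c
    · subst hx
      rw [PySem.List.index?_cons_self]
      simp
    · have hbeq : (x == c) = false := by simp [hx]
      rw [PySem.List.index?_cons_of_ne _ hx]
      simp only [List.find?_cons, hbeq, ih (s + 1)]
      cases PySem.List.index? xs c with
      | none => simp
      | some k =>
        simp
        omega

-- one step of B's outer loop, named so the statements stay readable
def pvStep (rotation : Int) (d : PySem.Dict Char Char) (chr_blok : String) : PySem.Dict Char Char :=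
  (PySem.List.enumerate chr_blok.toList 0).foldl
    (fun d pc =>
      if d.contains pc.2 then d
      else d.insert pc.2
        (PySem.List.pyGetD chr_blok.toList
          (PySem.Int.mod (pc.1 - rotation) (PySem.List.len chr_blok.toList)) pc.2))
    d

lemma pvStep_get? (rotation : Int) (c : Char) (b : String) (d : PySem.Dict Char Char) :
    (pvStep rotation d b).get? c
      = if d.contains c then d.get? c
        else (PySem.List.index? b.toList c).map (fun k =>
            PySem.List.pyGetD b.toList
              (PySem.Int.mod ((k : Int) - rotation) (PySem.List.len b.toList)) c) := by
  unfold pvStep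
  rw [pv_inner_fold_get?
        (fun pc => PySem.List.pyGetD b.toList
          (PySem.Int.mod (pc.1 - rotation) (PySem.List.len b.toList)) pc.2) c]
  by_cases hd : d.contains c = true
  · simp [hd]
  · simp only [hd, Bool.false_eq_true, if_false, pv_find?_enumerate c b.toList 0]
    cases PySem.List.index? b.toList c with
    | none => simp
    | some k => simp

lemma pv_outer_get? (rotation : Int) (c : Char) :
    ∀ (bloks : List String) (d : PySem.Dict Char Char),
    (bloks.foldl (pvStep rotation) d).get? c
      = if d.contains c then d.get? c else pvDecode? c rotation bloks := by
  intro bloks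
  induction bloks with
  | nil =>
    intro d
    simp only [List.foldl_nil, pvDecode?]
    by_cases h : d.contains c = true
    · simp [h]
    · simp [h, pv_get?_none (by simpa using h)]
  | cons b rest ih =>
    intro d
    simp only [List.foldl_cons, ih, pvDecode?]
    rw [PySem.Dict.contains_eq_isSome_get?, pvStep_get? rotation c b d]
    by_cases hd : d.contains c = true
    · simp [hd, ← PySem.Dict.contains_eq_isSome_get?]
    · simp only [hd, Bool.false_eq_true, if_false]
      cases hk : PySem.List.index? b.toList c with
      | none => simp
      | some k => simp

lemma pv_inner_eq_decode (rotation : Int) (c : Char) :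
    ∀ (bloks : List String),
    rot_decoder_inner c rotation bloks = (pvDecode? c rotation bloks).getD c := by
  intro bloks
  induction bloks with
  | nil => simp [rot_decoder_inner, pvDecode?]
  | cons b rest ih =>
    simp only [rot_decoder_inner, pvDecode?]
    by_cases hmem : c ∈ b.toList
    · have hsome : (PySem.List.index? b.toList c).isSome := by
        rw [PySem.List.index?_isSome_iff]; exact hmem
      cases hk : PySem.List.index? b.toList c with
      | none => rw [hk] at hsome; simp at hsome
      | some k => simp [hmem]
    · have hnone : PySem.List.index? b.toList c = none := by
        rw [PySem.List.index?_eq_none_iff]; exact hmem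
      rw [hnone]
      simp [hmem, ih]

lemma pv_char_eq (rotation : Int) (bloks : List String) (c : Char) :
    rot_decoder_inner c rotation bloks = (rot_decoder_build rotation bloks).getD c c := by
  rw [PySem.Dict.getD_eq_get?_getD]
  unfold rot_decoder_build
  have : (bloks.foldl
      (fun d chr_blok =>
        (PySem.List.enumerate chr_blok.toList 0).foldl
          (fun d pc =>
            if d.contains pc.2 then d
            else d.insert pc.2
              (PySem.List.pyGetD chr_blok.toList
                (PySem.Int.mod (pc.1 - rotation) (PySem.List.len chr_blok.toList)) pc.2))
          d)
      PySem.Dict.empty) = bloks.foldl (pvStep rotation) PySem.Dict.empty := rfl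
  rw [this, pv_outer_get? rotation c bloks PySem.Dict.empty]
  simp [PySem.Dict.contains_empty, pv_inner_eq_decode]

-- ===== VERDICT (by name: the statement is the Claim_ definition above) =====
theorem rot_decoder_spec : Claim_equal_rot_decoder := by
  intro string rotation chr_bloks _
  unfold Spec_rot_decoder rot_decoder rot_decoder_alt
  rw [PySem.List.foldl_append_singleton_eq_map]
  simp only [List.nil_append]
  congr 1
  exact List.map_congr_left (fun c _ => pv_char_eq rotation chr_bloks c)
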